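-- pv_equiv track=rewrite | github.com/ReadJ777/Patents | TERNARY_PROTOTYPE/benchmark/energy_benchmark.py | binary_decision_loop
-- ===== SOURCE A (Python) =====
-- def binary_decision_loop(iterations):
--     """Standard binary decision-making (always decide)"""
--     errors = 0
--     decisions = 0
--     for i in range(iterations):
--         confidence = (i * 17 + 31) % 100  # Simulated confidence
--         # Binary: must decide even when uncertain
--         if confidence >= 50:
--             decision = 1
--         else:
--             decision = 0
--         decisions += 1
--         # Error when confidence was low but forced decision
--         if confidence > 30 and confidence < 70:
--             errors += 1
--     return decisions, errors
-- ===== SOURCE B (Python) =====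
-- def binary_decision_loop(iterations):
--     """Closed-form: the confidence pattern repeats with period 100 (39 errors
--     per full period), so count full periods arithmetically and scan only the
--     remainder."""
--     if iterations <= 0:
--         return (0, 0)
--     full, rem = divmod(iterations, 100)
--     tail = sum(1 for i in range(rem) if 30 < (i * 17 + 31) % 100 < 70)
--     return (iterations, full * 39 + tail)
-- ===== Notes on version B (the rewrite author's own statement) =====
-- stated objective: faster
-- what changed: Replaced the O(n) per-iteration loop by a closed form: the confidence sequence (i*17+31)%100 has period 100 with exactly 39 error indices per period, so B computes full_periods*39 plus a scan of at most 99 remainder indices.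
import Mathlib
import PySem

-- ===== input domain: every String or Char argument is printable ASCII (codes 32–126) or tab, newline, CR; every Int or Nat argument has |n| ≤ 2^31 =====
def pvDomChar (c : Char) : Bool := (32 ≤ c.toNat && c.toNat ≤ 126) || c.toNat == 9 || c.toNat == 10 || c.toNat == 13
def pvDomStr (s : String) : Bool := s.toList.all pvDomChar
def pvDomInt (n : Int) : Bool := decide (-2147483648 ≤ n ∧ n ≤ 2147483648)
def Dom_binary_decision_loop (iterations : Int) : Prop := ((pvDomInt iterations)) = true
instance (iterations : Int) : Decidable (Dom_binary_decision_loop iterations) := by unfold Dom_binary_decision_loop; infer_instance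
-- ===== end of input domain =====

-- B replaces A's O(n) per-iteration loop by the period-100 closed form (39 errors
-- per full period plus a bounded remainder scan): objective = faster (asymptotic).


-- ===== PORT A =====
-- literal transliteration of A's loop; the dead variable 'decision' does not affect the state
def binary_decision_loop (iterations : Int) : List Int :=
  let s := (PySem.List.pyRange 0 iterations 1).foldl
    (fun (s : Int × Int) i =>
      let confidence := PySem.Int.mod (i * 17 + 31) 100
      let decisions := s.2 + 1
      let errors := if 30 < confidence ∧ confidence < 70 then s.1 + 1 else s.1
      (errors, decisions))
    (0, 0)
  [s.2, s.1]

-- ===== PORT B =====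
def binary_decision_loop_alt (iterations : Int) : List Int :=
  if iterations ≤ 0 then [0, 0]
  else
    let full := PySem.Int.floordiv iterations 100
    let rem := PySem.Int.mod iterations 100
    let tail := (PySem.List.pyRange 0 rem 1).foldl
      (fun (acc : Int) i =>
        if 30 < PySem.Int.mod (i * 17 + 31) 100 ∧ PySem.Int.mod (i * 17 + 31) 100 < 70
        then acc + 1 else acc)
      0
    [iterations, full * 39 + tail]

-- ===== PRECONDITION & SPEC =====
def Spec_binary_decision_loop (iterations : Int) (out : List Int) : Prop := out = binary_decision_loop_alt iterations
instance (iterations : Int) (out : List Int) : Decidable (Spec_binary_decision_loop iterations out) := by unfold Spec_binary_decision_loop; infer_instance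

-- ===== CLAIM (what is proved, stated in full; the proofs are below) =====
def Claim_equal_binary_decision_loop : Prop := ∀ (iterations : Int), Dom_binary_decision_loop iterations → Spec_binary_decision_loop iterations (binary_decision_loop iterations)

-- ===== LEMMAS AND PROOFS =====

/-- errors accumulated by the loop over `range(m)`. -/
def pvErr : Nat → Int
  | 0 => 0
  | m + 1 => pvErr m +
      (if 30 < PySem.Int.mod ((m : Int) * 17 + 31) 100 ∧
            PySem.Int.mod ((m : Int) * 17 + 31) 100 < 70 then 1 else 0)

theorem pvErr_periodic (m : Nat) :
    (if 30 < PySem.Int.mod ((m : Int) * 17 + 31) 100 ∧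
          PySem.Int.mod ((m : Int) * 17 + 31) 100 < 70 then (1:Int) else 0) =
    (if 30 < PySem.Int.mod (((m % 100 : Nat) : Int) * 17 + 31) 100 ∧
          PySem.Int.mod (((m % 100 : Nat) : Int) * 17 + 31) 100 < 70 then (1:Int) else 0) := by
  have h : PySem.Int.mod ((m : Int) * 17 + 31) 100
      = PySem.Int.mod (((m % 100 : Nat) : Int) * 17 + 31) 100 := by
    rw [PySem.Int.mod_eq_emod_of_pos (a := (m : Int) * 17 + 31) (by norm_num),
        PySem.Int.mod_eq_emod_of_pos (a := ((m % 100 : Nat) : Int) * 17 + 31) (by norm_num)]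
    omega
  rw [h]

set_option maxRecDepth 4096 in
theorem pvErr_closed (m : Nat) :
    pvErr m = ((m / 100 : Nat) : Int) * 39 + pvErr (m % 100) := by
  induction m with
  | zero => simp [pvErr]
  | succ m ih =>
    rw [pvErr, ih, pvErr_periodic m]
    by_cases h99 : m % 100 = 99
    · have e1 : (m + 1) % 100 = 0 := by omega
      have e2 : (m + 1) / 100 = m / 100 + 1 := by omega
      rw [e1, e2, h99]
      have step : pvErr 99 +
        (if 30 < PySem.Int.mod (((99 : Nat) : Int) * 17 + 31) 100 ∧
              PySem.Int.mod (((99 : Nat) : Int) * 17 + 31) 100 < 70 then (1:Int) else 0)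
        = 39 := by
        show pvErr 100 = 39
        decide
      rw [add_assoc, step]
      simp [pvErr]
      ring
    · have e1 : (m + 1) % 100 = m % 100 + 1 := by omega
      have e2 : (m + 1) / 100 = m / 100 := by omega
      rw [e1, e2, pvErr]
      ring

theorem pvLoopA (m : Nat) :
    (PySem.List.pyRange 0 (m : Int) 1).foldl
      (fun (s : Int × Int) i =>
        let confidence := PySem.Int.mod (i * 17 + 31) 100
        let decisions := s.2 + 1
        let errors := if 30 < confidence ∧ confidence < 70 then s.1 + 1 else s.1
        (errors, decisions))
      (0, 0) = (pvErr m, (m : Int)) := by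
  induction m with
  | zero => simp [show pvErr 0 = 0 from rfl]
  | succ m ih =>
    have : ((m + 1 : Nat) : Int) = (m : Int) + 1 := by push_cast; ring
    rw [this, PySem.List.pyRange_one_succ_right (a := 0) (b := (m : Int)) (by positivity),
        List.foldl_append, ih]
    simp [pvErr]
    split_ifs <;> ring

theorem pvLoopB (m : Nat) :
    (PySem.List.pyRange 0 (m : Int) 1).foldl
      (fun (acc : Int) i =>
        if 30 < PySem.Int.mod (i * 17 + 31) 100 ∧ PySem.Int.mod (i * 17 + 31) 100 < 70
        then acc + 1 else acc)
      0 = pvErr m := by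
  induction m with
  | zero => simp [show pvErr 0 = 0 from rfl]
  | succ m ih =>
    have : ((m + 1 : Nat) : Int) = (m : Int) + 1 := by push_cast; ring
    rw [this, PySem.List.pyRange_one_succ_right (a := 0) (b := (m : Int)) (by positivity),
        List.foldl_append, ih]
    simp [pvErr]
    split_ifs <;> ring

-- ===== VERDICT (by name: the statement is the Claim_ definition above) =====
theorem binary_decision_loop_spec : Claim_equal_binary_decision_loop := by
  intro iterations _
  unfold Spec_binary_decision_loop binary_decision_loop binary_decision_loop_alt
  by_cases hle : iterations ≤ 0
  · rw [if_pos hle, PySem.List.pyRange_one_eq_nil hle]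
    simp
  · rw [if_neg hle]
    rw [not_le] at hle
    obtain ⟨n, rfl⟩ : ∃ n : Nat, iterations = (n : Int) :=
      ⟨iterations.toNat, (Int.toNat_of_nonneg hle.le).symm⟩
    rw [pvLoopA n]
    have hdiv : PySem.Int.floordiv (n : Int) 100 = ((n / 100 : Nat) : Int) := by
      exact_mod_cast PySem.Int.floordiv_natCast n 100
    have hmod : PySem.Int.mod (n : Int) 100 = ((n % 100 : Nat) : Int) := by
      exact_mod_cast PySem.Int.mod_natCast n 100
    simp only [hdiv, hmod, pvLoopB (n % 100)]
    rw [pvErr_closed n]
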